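-- pv_equiv track=rewrite | github.com/caseprepd-app/CaseSummarizer | src/core/vocabulary/name_deduplicator.py | _build_candidate_pairs
-- ===== SOURCE A (Python) =====
-- def _build_candidate_pairs(keys: list[str]) -> set[tuple[int, int]]:
--     """
--     Build candidate pairs using first-letter blocking.
--
--     Only names starting with the same letter are compared.
--     This reduces O(n²) comparisons to ~O(n²/26) for uniformly distributed names.
--
--     Session 70 optimization for large vocabularies (500+ names).
--
--     Args:
--         keys: List of normalized name strings
--
--     Returns:
--         Set of (i, j) index pairs that should be compared
--     """
--     from collections import defaultdict
--
--     # Group indices by first letter (case-insensitive)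
--     by_first_letter: dict[str, list[int]] = defaultdict(list)
--     for i, key in enumerate(keys):
--         if key:
--             first_char = key[0].lower()
--             by_first_letter[first_char].append(i)
--
--     # Build pairs only within same first-letter groups
--     pairs: set[tuple[int, int]] = set()
--     for indices in by_first_letter.values():
--         for a, idx1 in enumerate(indices):
--             for idx2 in indices[a + 1 :]:
--                 pairs.add((idx1, idx2))
--
--     return pairs
-- ===== SOURCE B (Python) =====
-- def _build_candidate_pairs(keys: list[str]) -> set[tuple[int, int]]:
--     """Pair up indices of names sharing a first letter by peeling one
--     letter class at a time off a worklist of (index, letter) entries."""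
--     remaining = [(i, key[0].lower()) for i, key in enumerate(keys) if key]
--     pairs: set[tuple[int, int]] = set()
--     while remaining:
--         letter = remaining[0][1]
--         group = [i for i, d in remaining if d == letter]
--         pairs.update((x, y) for a, x in enumerate(group) for y in group[a + 1:])
--         remaining = [(i, d) for i, d in remaining if d != letter]
--     return pairs
-- ===== Notes on version B (the rewrite author's own statement) =====
-- stated objective: alternative
-- what changed: Replaces the defaultdict first-letter index table (group all indices by letter, then pair within each stored group) with a worklist peeling loop: repeatedly take the first remaining entry's letter, pair up all indices carrying that letter, and filter that letter out of the worklist; no dictionary is built.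
import Mathlib
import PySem

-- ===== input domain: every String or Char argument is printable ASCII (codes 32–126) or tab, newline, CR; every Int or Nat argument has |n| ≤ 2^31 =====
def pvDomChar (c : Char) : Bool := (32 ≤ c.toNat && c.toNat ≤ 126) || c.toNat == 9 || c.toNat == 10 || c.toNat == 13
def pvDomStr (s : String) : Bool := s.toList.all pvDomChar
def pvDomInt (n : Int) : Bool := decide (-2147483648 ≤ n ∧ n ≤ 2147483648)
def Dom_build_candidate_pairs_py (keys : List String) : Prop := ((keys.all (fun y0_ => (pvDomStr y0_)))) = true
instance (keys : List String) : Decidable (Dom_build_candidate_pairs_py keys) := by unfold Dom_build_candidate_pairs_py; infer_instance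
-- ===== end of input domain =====

-- B replaces A's defaultdict first-letter index table by a worklist peeling loop (objective: alternative).

-- ===== PORT A =====
-- A's first phase: group indices by lowered first letter (defaultdict(list) append loop)
def bcpByFirst (keys : List String) : PySem.Dict Char (List Int) :=
  (PySem.List.enumerate keys).foldl
    (fun d p =>
      match p.2.toList with
      | [] => d
      | c :: _ => d.modify (PySem.Chars.lowerChar c) [] (· ++ [p.1]))
    PySem.Dict.empty

def build_candidate_pairs_py (keys : List String) : List (Int × Int) :=
  (bcpByFirst keys).values.foldl
    (fun s indices =>
      (PySem.List.enumerate indices).foldl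
        (fun s q =>
          (PySem.List.slice indices (some (q.1 + 1)) none).foldl
            (fun s idx2 => PySem.Set.add s (q.2, idx2)) s)
        s)
    PySem.Set.empty

-- ===== PORT B =====
-- B's worklist of (index, lowered first letter) entries (the filtered comprehension)
def bcpEntries (keys : List String) : List (Int × Char) :=
  (PySem.List.enumerate keys).filterMap (fun p =>
    match p.2.toList with
    | [] => none
    | c :: _ => some (p.1, PySem.Chars.lowerChar c))

-- B's while loop: peel off the first remaining entry's letter class each round
def bcpPeel : List (Int × Char) → List (Int × Int) → List (Int × Int)
  | [], pairs => pairs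
  | (i, c) :: rest, pairs =>
    let remaining := (i, c) :: rest
    let group := (remaining.filter (fun p => p.2 == c)).map (·.1)
    bcpPeel (remaining.filter (fun p => p.2 != c))
      (PySem.Set.update pairs
        ((PySem.List.enumerate group).flatMap (fun q =>
          (PySem.List.slice group (some (q.1 + 1)) none).map (fun y => (q.2, y)))))
termination_by r _ => r.length
decreasing_by
  simp only [List.filter_cons]
  simp
  exact List.length_filter_le _ _

def build_candidate_pairs_py_alt (keys : List String) : List (Int × Int) :=
  bcpPeel (bcpEntries keys) PySem.Set.empty

-- ===== PRECONDITION & SPEC =====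
def Spec_build_candidate_pairs_py (keys : List String) (out : List (Int × Int)) : Prop := out = build_candidate_pairs_py_alt keys
instance (keys : List String) (out : List (Int × Int)) : Decidable (Spec_build_candidate_pairs_py keys out) := by unfold Spec_build_candidate_pairs_py; infer_instance

-- ===== CLAIM (what is proved, stated in full; the proofs are below) =====
def Claim_equal_build_candidate_pairs_py : Prop := ∀ (keys : List String), Dom_build_candidate_pairs_py keys → Spec_build_candidate_pairs_py keys (build_candidate_pairs_py keys)

-- ===== LEMMAS AND PROOFS =====

-- (letter, index) entries A's grouping loop actually processes
def bcpF (p : Int × String) : Option (Char × Int) :=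
  match p.2.toList with
  | [] => none
  | c :: _ => some (PySem.Chars.lowerChar c, p.1)

def bcpP (keys : List String) : List (Char × Int) :=
  (PySem.List.enumerate keys).filterMap bcpF

-- all in-order pairs of a list
def bcpPairsRec : List Int → List (Int × Int)
  | [] => []
  | x :: t => t.map (fun y => (x, y)) ++ bcpPairsRec t

-- A's grouping fold = plain defaultdict-append fold over the filterMapped entries
theorem bcp_dict_fold (l : List (Int × String)) (d : PySem.Dict Char (List Int)) :
    l.foldl
      (fun d p =>
        match p.2.toList with
        | [] => d
        | c :: _ => d.modify (PySem.Chars.lowerChar c) [] (· ++ [p.1])) d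
    = (l.filterMap bcpF).foldl (fun d q => d.modify q.1 [] (· ++ [q.2])) d := by
  induction l generalizing d with
  | nil => rfl
  | cons p l ih =>
    cases h : p.2.toList with
    | nil => simp [bcpF, h, ih]
    | cons c cs => simp [bcpF, h, ih]

-- B's worklist = A's entries with the components swapped
theorem bcp_entries_eq (keys : List String) :
    bcpEntries keys = (bcpP keys).map (fun q => (q.2, q.1)) := by
  unfold bcpEntries bcpP
  rw [List.map_filterMap]
  refine List.filterMap_congr (fun p _ => ?_)
  cases h : p.2.toList with
  | nil => simp [bcpF, h]
  | cons c cs => simp [bcpF, h]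

-- nested fold over pieces = fold over the flattened list
theorem bcp_foldl_flatMap {α β γ : Type} (l : List α) (h : α → List β) (f : γ → β → γ) (s : γ) :
    l.foldl (fun s x => (h x).foldl f s) s = (l.flatMap h).foldl f s := by
  induction l generalizing s with
  | nil => rfl
  | cons x l ih => simp [List.flatMap_cons, List.foldl_append, ih]

-- the enumerate/slice double comprehension flattens to bcpPairsRec
theorem bcp_pairs_slice_aux (xs pre : List Int) :
    (PySem.List.enumerate xs (pre.length : Int)).flatMap
      (fun q => (PySem.List.slice (pre ++ xs) (some (q.1 + 1)) none).map (fun j => (q.2, j)))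
    = bcpPairsRec xs := by
  induction xs generalizing pre with
  | nil => simp [PySem.List.enumerate_nil, bcpPairsRec]
  | cons x xs ih =>
    rw [PySem.List.enumerate_cons, List.flatMap_cons]
    have h1 : PySem.List.slice (pre ++ x :: xs) (some ((pre.length : Int) + 1)) none = xs := by
      have : ((pre.length : Int) + 1) = ((pre.length + 1 : Nat) : Int) := by push_cast; ring
      rw [this, PySem.List.slice_from_natCast]
      have : pre ++ x :: xs = (pre ++ [x]) ++ xs := by simp
      rw [this]
      have hlen : (pre ++ [x]).length = pre.length + 1 := by simp
      rw [← hlen, List.drop_left]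
    have h2 : (PySem.List.enumerate xs ((pre.length : Int) + 1)).flatMap
        (fun q => (PySem.List.slice (pre ++ x :: xs) (some (q.1 + 1)) none).map (fun j => (q.2, j)))
        = bcpPairsRec xs := by
      have hl : ((pre.length : Int) + 1) = (((pre ++ [x]).length : Nat) : Int) := by simp
      have hx : pre ++ x :: xs = (pre ++ [x]) ++ xs := by simp
      rw [hl, hx]
      exact ih (pre ++ [x])
    rw [h1, h2]
    rfl

theorem bcp_pairs_slice (l : List Int) :
    (PySem.List.enumerate l).flatMap
      (fun q => (PySem.List.slice l (some (q.1 + 1)) none).map (fun j => (q.2, j)))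
    = bcpPairsRec l := by
  have := bcp_pairs_slice_aux l []
  simpa using this

-- A's inner double fold with Set.add = fold of Set.add over bcpPairsRec
theorem bcp_inner_fold (indices : List Int) (s : List (Int × Int)) :
    (PySem.List.enumerate indices).foldl
      (fun s q =>
        (PySem.List.slice indices (some (q.1 + 1)) none).foldl
          (fun s idx2 => PySem.Set.add s (q.2, idx2)) s) s
    = (bcpPairsRec indices).foldl PySem.Set.add s := by
  have h : (fun (s : List (Int × Int)) (q : Int × Int) =>
      (PySem.List.slice indices (some (q.1 + 1)) none).foldl
        (fun s idx2 => PySem.Set.add s (q.2, idx2)) s)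
      = (fun s q =>
        ((PySem.List.slice indices (some (q.1 + 1)) none).map (fun j => (q.2, j))).foldl
          PySem.Set.add s) := by
    funext s q
    rw [List.foldl_map]
  rw [h, bcp_foldl_flatMap, bcp_pairs_slice]

-- A's whole second phase, for any list of groups
theorem bcp_phase2 (vl : List (List Int)) :
    vl.foldl
      (fun s indices =>
        (PySem.List.enumerate indices).foldl
          (fun s q =>
            (PySem.List.slice indices (some (q.1 + 1)) none).foldl
              (fun s idx2 => PySem.Set.add s (q.2, idx2)) s) s) PySem.Set.empty
    = (vl.flatMap bcpPairsRec).foldl PySem.Set.add [] := by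
  have h : (fun (s : List (Int × Int)) (indices : List Int) =>
      (PySem.List.enumerate indices).foldl
        (fun s q =>
          (PySem.List.slice indices (some (q.1 + 1)) none).foldl
            (fun s idx2 => PySem.Set.add s (q.2, idx2)) s) s)
      = fun s indices => (bcpPairsRec indices).foldl PySem.Set.add s := by
    funext s indices
    exact bcp_inner_fold indices s
  rw [h, bcp_foldl_flatMap]
  rfl

-- adding a present element is a no-op
theorem bcp_add_mem {α : Type} [BEq α] [LawfulBEq α] (s : List α) (c : α) (h : c ∈ s) :
    PySem.Set.add s c = s := by
  simp [PySem.Set.add, PySem.Set.contains, h]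

-- folding adds ignores elements already in the accumulator
theorem bcp_foldl_add_filter {α : Type} [BEq α] [LawfulBEq α] (c : α) (xs : List α)
    (s : List α) (h : c ∈ s) :
    xs.foldl PySem.Set.add s = (xs.filter (fun d => d != c)).foldl PySem.Set.add s := by
  induction xs generalizing s with
  | nil => rfl
  | cons x xs ih =>
    by_cases hx : x = c
    · subst hx
      simp only [List.filter_cons, bne_self_eq_false, Bool.false_eq_true, if_false,
        List.foldl_cons, bcp_add_mem s x h]
      exact ih s h
    · have hb : (x != c) = true := by simp [hx]
      simp only [List.filter_cons, hb, if_true, List.foldl_cons]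
      exact ih (PySem.Set.add s x) (by simp [PySem.Set.mem_add, h])

-- a head the tail never repeats floats out of the fold
theorem bcp_foldl_add_cons {α : Type} [BEq α] [LawfulBEq α] (c : α) (xs : List α)
    (s : List α) (h : ∀ x ∈ xs, x ≠ c) :
    xs.foldl PySem.Set.add (c :: s) = c :: xs.foldl PySem.Set.add s := by
  induction xs generalizing s with
  | nil => rfl
  | cons x xs ih =>
    have hx : x ≠ c := h x (by simp)
    have hcs : PySem.Set.add (c :: s) x = c :: PySem.Set.add s x := by
      have hxc : (x == c) = false := beq_eq_false_iff_ne.mpr hx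
      by_cases hm : x ∈ s <;> simp [PySem.Set.add, PySem.Set.contains, hxc, hm]
    simp only [List.foldl_cons, hcs]
    exact ih (PySem.Set.add s x) (fun y hy => h y (by simp [hy]))

-- set(c :: xs) = c :: set(xs with c removed)
theorem bcp_ofList_cons {α : Type} [BEq α] [LawfulBEq α] (c : α) (xs : List α) :
    PySem.Set.ofList (c :: xs) = c :: PySem.Set.ofList (xs.filter (fun d => d != c)) := by
  have h0 : PySem.Set.ofList (c :: xs) = xs.foldl PySem.Set.add [c] := by
    rw [PySem.Set.ofList_eq_foldl]
    rfl
  rw [h0, bcp_foldl_add_filter c xs [c] (by simp)]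
  rw [bcp_foldl_add_cons c _ [] (fun x hx => by
    have := List.of_mem_filter hx
    simpa using this)]
  rw [PySem.Set.ofList_eq_foldl]

-- B's peeling loop computes the letters-grouped normal form
theorem bcp_peel_norm (k : Nat) :
    ∀ (e : List (Int × Char)) (s : List (Int × Int)), e.length ≤ k →
    bcpPeel e s
      = (((PySem.Set.ofList (e.map (·.2))).map
            (fun c => (e.filter (fun p => p.2 == c)).map (·.1))).flatMap
          bcpPairsRec).foldl PySem.Set.add s := by
  induction k with
  | zero =>
    intro e s he
    have : e = [] := List.eq_nil_of_length_eq_zero (Nat.le_zero.mp he)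
    subst this
    simp [bcpPeel, PySem.Set.ofList_eq_foldl]
  | succ k ih =>
    intro e s he
    match e with
    | [] => simp [bcpPeel, PySem.Set.ofList_eq_foldl]
    | (i, c) :: rest =>
      have hhead : (((i, c) :: rest).filter (fun p => p.2 != c)) = rest.filter (fun p => p.2 != c) := by
        simp
      have hlen : (rest.filter (fun p => p.2 != c)).length ≤ k := by
        have h1 := List.length_filter_le (fun p => p.2 != c) rest
        simp only [List.length_cons] at he
        omega
      rw [bcpPeel]
      rw [hhead]
      rw [ih _ _ hlen]
      -- rewrite the inner pair comprehension and Set.update as folds of bcpPairsRec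
      set group := ((((i, c) :: rest).filter (fun p => p.2 == c)).map (·.1)) with hgroup
      have hupd : ∀ (p : List (Int × Int)),
          PySem.Set.update p
            ((PySem.List.enumerate group).flatMap (fun q =>
              (PySem.List.slice group (some (q.1 + 1)) none).map (fun y => (q.2, y))))
          = (bcpPairsRec group).foldl PySem.Set.add p := by
        intro p
        rw [bcp_pairs_slice group]
        rfl
      rw [hupd]
      -- the letter set of the full worklist splits as head letter + the peeled rest
      have hmap : ((i, c) :: rest).map (·.2) = c :: rest.map (·.2) := by simp
      have hfm : ((rest.map (·.2)).filter (fun d => d != c))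
          = (rest.filter (fun p => p.2 != c)).map (·.2) := by
        rw [List.filter_map]
        rfl
      have hletters : PySem.Set.ofList (((i, c) :: rest).map (·.2))
          = c :: PySem.Set.ofList ((rest.filter (fun p => p.2 != c)).map (·.2)) := by
        rw [hmap, bcp_ofList_cons, hfm]
      rw [hletters]
      rw [List.map_cons, List.flatMap_cons, List.foldl_append]
      -- later letters see the same groups in the full and in the peeled worklist
      have hgrps : (PySem.Set.ofList ((rest.filter (fun p => p.2 != c)).map (·.2))).map
            (fun c' => (((i, c) :: rest).filter (fun p => p.2 == c')).map (·.1))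
          = (PySem.Set.ofList ((rest.filter (fun p => p.2 != c)).map (·.2))).map
            (fun c' => ((rest.filter (fun p => p.2 != c)).filter (fun p => p.2 == c')).map (·.1)) := by
        refine List.map_congr_left (fun c' hc' => ?_)
        have hc'mem : c' ∈ (rest.filter (fun p => p.2 != c)).map (·.2) := by
          exact (PySem.Set.mem_ofList _ _).mp hc'
        have hne : c' ≠ c := by
          rcases List.mem_map.mp hc'mem with ⟨p, hp, hpc⟩
          have := List.of_mem_filter hp
          simp only [bne_iff_ne, ne_eq] at this
          rw [← hpc]
          exact this
        have h1 : (((i, c) :: rest).filter (fun p => p.2 == c')) = rest.filter (fun p => p.2 == c') := by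
          have : ((c == c') = false) := beq_eq_false_iff_ne.mpr (Ne.symm hne)
          simp [this]
        rw [h1, List.filter_filter]
        refine congrArg _ (List.filter_congr (fun p _ => ?_)) |>.symm
        by_cases hp : p.2 = c'
        · simp [hp, hne]
        · simp [hp]
      rw [hgrps]

-- ===== VERDICT (by name: the statement is the Claim_ definition above) =====
theorem build_candidate_pairs_py_spec : Claim_equal_build_candidate_pairs_py := by
  intro keys _
  unfold Spec_build_candidate_pairs_py build_candidate_pairs_py build_candidate_pairs_py_alt
  have hdict : bcpByFirst keys
      = (bcpP keys).foldl (fun d q => d.modify q.1 [] (· ++ [q.2])) PySem.Dict.empty := by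
    unfold bcpByFirst bcpP
    exact bcp_dict_fold _ _
  have hkeys : (bcpByFirst keys).keys = PySem.Set.ofList ((bcpP keys).map (·.1)) := by
    rw [hdict,
      PySem.Dict.keys_foldl_modify_key (bcpP keys) (·.1) [] (fun _ q v => v ++ [q.2])
        PySem.Dict.empty]
    have hek : (PySem.Dict.empty : PySem.Dict Char (List Int)).keys = [] := rfl
    rw [hek]
    rfl
  have hnodup : (bcpByFirst keys).keys.Nodup := by
    rw [hdict]
    exact PySem.Dict.nodup_keys_foldl_modify_key (bcpP keys) (·.1) [] (fun _ q v => v ++ [q.2])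
      PySem.Dict.empty (by simp [PySem.Dict.empty])
  have hgetD : ∀ c, (bcpByFirst keys).getD c [] =
      ((bcpP keys).filter (fun q => q.1 == c)).map (·.2) := by
    intro c
    rw [hdict, PySem.Dict.getD_foldl_modify_append (bcpP keys) PySem.Dict.empty c]
    have he : (PySem.Dict.empty : PySem.Dict Char (List Int)).getD c [] = [] := rfl
    rw [he, List.nil_append]
  have hvals : (bcpByFirst keys).values
      = ((bcpByFirst keys).keys).map (fun c => (bcpByFirst keys).getD c []) :=
    PySem.Dict.values_eq_map_keys (bcpByFirst keys) hnodup []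
  rw [bcp_phase2, hvals, hkeys]
  rw [bcp_peel_norm (bcpEntries keys).length (bcpEntries keys) PySem.Set.empty le_rfl]
  have hswap : bcpEntries keys = (bcpP keys).map (fun q => (q.2, q.1)) := bcp_entries_eq keys
  have hm : (bcpEntries keys).map (·.2) = (bcpP keys).map (·.1) := by
    rw [hswap, List.map_map]
    rfl
  have hgrp : ∀ c, ((bcpEntries keys).filter (fun p => p.2 == c)).map (·.1)
      = ((bcpP keys).filter (fun q => q.1 == c)).map (·.2) := by
    intro c
    rw [hswap, List.filter_map, List.map_map]
    rfl
  rw [hm]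
  have hfinal : (PySem.Set.ofList ((bcpP keys).map (·.1))).map (fun c => (bcpByFirst keys).getD c [])
      = (PySem.Set.ofList ((bcpP keys).map (·.1))).map
          (fun c => ((bcpEntries keys).filter (fun p => p.2 == c)).map (·.1)) := by
    refine List.map_congr_left fun c _ => ?_
    rw [hgetD c]
    exact (hgrp c).symm
  rw [hfinal]
  rfl
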